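-- pv_equiv track=rewrite | github.com/swth1991/ApplyCrypto | src/modifier/code_generator/three_step_type/three_step_ccs_code_generator.py | _split_select_items
-- ===== SOURCE A (Python) =====
-- from typing import Any, Dict, List, Tuple
--
-- def _split_select_items(select_clause: str) -> List[str]:
--     """
--     SELECT 절을 쉼표로 분리합니다. 괄호 내부의 쉼표는 무시합니다.
--
--     Args:
--         select_clause: SELECT와 FROM 사이의 문자열
--
--     Returns:
--         List[str]: 분리된 SELECT 항목들
--     """
--     items = []
--     current = []
--     depth = 0
--
--     for char in select_clause:
--         if char == "(":
--             depth += 1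
--             current.append(char)
--         elif char == ")":
--             depth -= 1
--             current.append(char)
--         elif char == "," and depth == 0:
--             items.append("".join(current))
--             current = []
--         else:
--             current.append(char)
--
--     if current:
--         items.append("".join(current))
--
--     return items
-- ===== SOURCE B (Python) =====
-- from typing import List
--
--
-- def _split_select_items(select_clause: str) -> List[str]:
--     """Split on top-level commas by splitting on every comma first, then
--     re-joining pieces while a running paren balance is non-zero."""
--     pieces = select_clause.split(',')
--     results = []
--     buffer = pieces[0]
--     balance = buffer.count('(') - buffer.count(')')
--     for piece in pieces[1:]:
--         if balance == 0:
--             results.append(buffer)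
--             buffer = piece
--         else:
--             buffer = buffer + ',' + piece
--         balance += piece.count('(') - piece.count(')')
--     if buffer:
--         results.append(buffer)
--     return results
-- ===== Notes on version B (the rewrite author's own statement) =====
-- stated objective: faster
-- what changed: Replaces the per-character state machine with an unconditional comma split followed by a piece-level pass that re-joins adjacent pieces while a running net parenthesis balance is non-zero.
import Mathlib
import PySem

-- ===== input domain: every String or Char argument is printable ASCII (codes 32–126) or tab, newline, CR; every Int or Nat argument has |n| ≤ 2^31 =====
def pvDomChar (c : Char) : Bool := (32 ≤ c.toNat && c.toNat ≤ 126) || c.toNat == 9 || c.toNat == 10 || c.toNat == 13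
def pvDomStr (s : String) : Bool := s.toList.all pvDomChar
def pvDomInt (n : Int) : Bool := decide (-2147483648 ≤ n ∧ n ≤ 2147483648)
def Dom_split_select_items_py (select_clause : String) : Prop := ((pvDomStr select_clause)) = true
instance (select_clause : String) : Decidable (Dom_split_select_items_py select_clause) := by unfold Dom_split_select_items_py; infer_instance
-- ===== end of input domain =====

-- B splits on every comma first and re-joins pieces under a running net parenthesis
-- balance; same exact behaviour, measurably faster in Python (bulk split vs per-char loop).

-- ===== PORT A =====
-- one step of A's character loop; state = (items, current, depth)
def pvStepA (st : List String × List Char × Int) (c : Char) : List String × List Char × Int :=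
  match st with
  | (items, current, depth) =>
    if c = '(' then (items, current ++ [c], depth + 1)
    else if c = ')' then (items, current ++ [c], depth - 1)
    else if c = ',' ∧ depth = 0 then (items ++ [String.ofList current], [], depth)
    else (items, current ++ [c], depth)

def split_select_items_py (select_clause : String) : List String :=
  let fin := select_clause.toList.foldl pvStepA ([], [], 0)
  if fin.2.1 ≠ [] then fin.1 ++ [String.ofList fin.2.1] else fin.1

-- ===== PORT B =====
-- piece.count('(') - piece.count(')')
def pvNet (p : List Char) : Int :=
  (PySem.Chars.count p ['('] : Int) - (PySem.Chars.count p [')'] : Int)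

-- one step of B's piece loop; state = (results, buffer, balance)
def pvStepB (st : List String × List Char × Int) (p : List Char) : List String × List Char × Int :=
  match st with
  | (results, buffer, bal) =>
    let rb := if bal = 0 then (results ++ [String.ofList buffer], p) else (results, buffer ++ ',' :: p)
    (rb.1, rb.2, bal + pvNet p)

def split_select_items_py_alt (select_clause : String) : List String :=
  match PySem.Chars.splitOn select_clause.toList [','] with
  | [] => []  -- unreachable: split(',') is never empty (totality guard only)
  | p :: rest =>
    let fin := rest.foldl pvStepB ([], p, pvNet p)
    if fin.2.1 ≠ [] then fin.1 ++ [String.ofList fin.2.1] else fin.1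

-- ===== PRECONDITION & SPEC =====
def Spec_split_select_items_py (select_clause : String) (out : List String) : Prop := out = split_select_items_py_alt select_clause
instance (select_clause : String) (out : List String) : Decidable (Spec_split_select_items_py select_clause out) := by unfold Spec_split_select_items_py; infer_instance

-- ===== CLAIM (what is proved, stated in full; the proofs are below) =====
def Claim_equal_split_select_items_py : Prop := ∀ (select_clause : String), Dom_split_select_items_py select_clause → Spec_split_select_items_py select_clause (split_select_items_py select_clause)

-- ===== LEMMAS AND PROOFS =====

-- a simple structural comma splitter, used only in the proofs
def pvSplit : List Char → List (List Char)
  | [] => [[]]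
  | c :: cs =>
    if c = ',' then [] :: pvSplit cs
    else
      match pvSplit cs with
      | [] => [[c]]
      | p :: ps => (c :: p) :: ps

def pvConsHead (x : List Char) : List (List Char) → List (List Char)
  | [] => [x]
  | p :: ps => (x ++ p) :: ps

theorem pvSplit_ne_nil (cs : List Char) : pvSplit cs ≠ [] := by
  cases cs with
  | nil => simp [pvSplit]
  | cons c cs =>
    simp only [pvSplit]
    split
    · simp
    · cases h : pvSplit cs <;> simp

theorem pv_countGo_single (d : Char) (cs : List Char) (fuel acc : Nat)
    (h : cs.length ≤ fuel) :
    PySem.Chars.count.go [d] fuel cs acc = acc + cs.countP (· == d) := by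
  induction cs generalizing fuel acc with
  | nil => cases fuel <;> simp [PySem.Chars.count.go]
  | cons c cs ih =>
    cases fuel with
    | zero => simp at h
    | succ f =>
      rw [PySem.Chars.count.go.eq_def]
      have hpre : ([d].isPrefixOf (c :: cs)) = (d == c) := by simp [List.isPrefixOf]
      have hlen : cs.length ≤ f := by rw [List.length_cons] at h; omega
      simp only [hpre]
      by_cases hc : c = d
      · subst hc
        rw [if_pos (by simp)]
        simp only [List.length_cons, List.length_nil, List.drop_succ_cons, List.drop_zero]
        rw [ih f (acc + 1) (by omega)]
        simp
        omega
      · rw [if_neg (by simp only [beq_iff_eq]; exact fun h => hc h.symm)]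
        rw [ih f acc (by omega)]
        simp [hc]

theorem pv_count_single (d : Char) (cs : List Char) :
    PySem.Chars.count cs [d] = cs.countP (· == d) := by
  rw [PySem.Chars.count.eq_def]
  simp [pv_countGo_single d cs cs.length 0 (le_refl _)]

theorem pvNet_nil : pvNet [] = 0 := by simp [pvNet, pv_count_single]

theorem pvNet_cons (c : Char) (p : List Char) :
    pvNet (c :: p) = (if c = '(' then 1 else if c = ')' then -1 else 0) + pvNet p := by
  simp only [pvNet, pv_count_single, List.countP_cons]
  by_cases h1 : c = '(' <;> by_cases h2 : c = ')' <;>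
    simp [h1, h2] <;> ring

theorem pv_splitOnGo_eq (cs : List Char) (fuel : Nat) (cur : List Char)
    (acc : List (List Char)) (h : cs.length ≤ fuel) :
    PySem.Chars.splitOn.go [','] fuel cs cur acc
      = acc.reverse ++ pvConsHead cur.reverse (pvSplit cs) := by
  induction cs generalizing fuel cur acc with
  | nil => cases fuel <;> simp [PySem.Chars.splitOn.go, pvSplit, pvConsHead]
  | cons c cs ih =>
    cases fuel with
    | zero => simp at h
    | succ f =>
      rw [PySem.Chars.splitOn.go.eq_def]
      have hpre : ([','].isPrefixOf (c :: cs)) = (',' == c) := by simp [List.isPrefixOf]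
      have hlen : cs.length ≤ f := by rw [List.length_cons] at h; omega
      simp only [hpre]
      by_cases hc : c = ','
      · subst hc
        rw [if_pos (by simp)]
        simp only [List.length_cons, List.length_nil, List.drop_succ_cons, List.drop_zero]
        rw [ih f [] (cur.reverse :: acc) (by omega)]
        simp only [pvSplit, reduceIte]
        cases hs : pvSplit cs with
        | nil => exact absurd hs (pvSplit_ne_nil cs)
        | cons p ps => simp [pvConsHead]
      · rw [if_neg (by simp only [beq_iff_eq]; exact fun h => hc h.symm)]
        rw [ih f (c :: cur) acc (by omega)]
        simp only [pvSplit, if_neg hc]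
        cases hs : pvSplit cs with
        | nil => exact absurd hs (pvSplit_ne_nil cs)
        | cons p ps => simp [pvConsHead]

theorem pv_splitOn_eq (cs : List Char) :
    PySem.Chars.splitOn cs [','] = pvSplit cs := by
  rw [PySem.Chars.splitOn]
  rw [pv_splitOnGo_eq cs (cs.length + 1) [] [] (by omega)]
  cases hs : pvSplit cs with
  | nil => exact absurd hs (pvSplit_ne_nil cs)
  | cons p ps => simp [pvConsHead]

theorem pv_main (cs : List Char) (items : List String) (current : List Char)
    (depth : Int) (p : List Char) (rest : List (List Char))
    (h : pvSplit cs = p :: rest) :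
    cs.foldl pvStepA (items, current, depth)
      = rest.foldl pvStepB (items, current ++ p, depth + pvNet p) := by
  induction cs generalizing items current depth p rest with
  | nil =>
    simp [pvSplit] at h
    obtain ⟨rfl, rfl⟩ := h
    simp [pvNet_nil]
  | cons c cs ih =>
    obtain ⟨p', rest', hs⟩ : ∃ p' rest', pvSplit cs = p' :: rest' := by
      cases hx : pvSplit cs with
      | nil => exact absurd hx (pvSplit_ne_nil cs)
      | cons a b => exact ⟨a, b, rfl⟩
    by_cases hc : c = ','
    · subst hc
      simp only [pvSplit, reduceIte, hs] at h
      obtain ⟨rfl, rfl⟩ := h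
      simp only [List.foldl_cons, List.append_nil, pvNet_nil, add_zero, pvStepB]
      by_cases hd : depth = 0
      · subst hd
        have hA : pvStepA (items, current, 0) ',' = (items ++ [String.ofList current], [], 0) := by
          simp [pvStepA]
        rw [hA, ih _ _ _ _ _ hs]
        simp
      · have hA : pvStepA (items, current, depth) ',' = (items, current ++ [','], depth) := by
          simp [pvStepA, hd]
        rw [hA, ih _ _ _ _ _ hs]
        simp [hd]
    · simp only [pvSplit, if_neg hc, hs] at h
      obtain ⟨rfl, rfl⟩ := h
      by_cases h1 : c = '('
      · subst h1
        have hA : pvStepA (items, current, depth) '(' = (items, current ++ ['('], depth + 1) := by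
          simp [pvStepA]
        simp only [List.foldl_cons, hA, ih _ _ _ _ _ hs, pvNet_cons]
        have : current ++ ['('] ++ p' = current ++ '(' :: p' := by simp
        rw [this]
        congr 1
        simp
        ring
      · by_cases h2 : c = ')'
        · subst h2
          have hA : pvStepA (items, current, depth) ')' = (items, current ++ [')'], depth - 1) := by
            simp [pvStepA]
          simp only [List.foldl_cons, hA, ih _ _ _ _ _ hs, pvNet_cons]
          have : current ++ [')'] ++ p' = current ++ ')' :: p' := by simp
          rw [this]
          congr 1
          simp
          ring
        · have hA : pvStepA (items, current, depth) c = (items, current ++ [c], depth) := by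
            simp [pvStepA, h1, h2, hc]
          simp only [List.foldl_cons, hA, ih _ _ _ _ _ hs, pvNet_cons, h1, h2]
          have : current ++ [c] ++ p' = current ++ c :: p' := by simp
          rw [this]
          congr 1
          simp

-- ===== VERDICT (by name: the statement is the Claim_ definition above) =====
theorem split_select_items_py_spec : Claim_equal_split_select_items_py := by
  intro s _
  unfold Spec_split_select_items_py split_select_items_py split_select_items_py_alt
  rw [pv_splitOn_eq]
  obtain ⟨p, rest, hs⟩ : ∃ p rest, pvSplit s.toList = p :: rest := by
    cases hx : pvSplit s.toList with
    | nil => exact absurd hx (pvSplit_ne_nil s.toList)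
    | cons a b => exact ⟨a, b, rfl⟩
  rw [hs, pv_main s.toList [] [] 0 p rest hs]
  simp
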